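-- pv_equiv track=rewrite | github.com/cscosu/ctf-writeups | 2021/def_con_quals/mooosl/solve.py | brute_force_collision
-- ===== SOURCE A (Python) =====
-- START = (0x7e5)
--
-- def brute_force_collision(desired_bucket, cur_num=START):
--     options = []
--     for x in range(256):
--         for y in range(256):
--             cur_num = START
--             cur_num = ((x + cur_num * 0x13377331))
--             cur_num = ((y + cur_num * 0x13377331))
--             if (cur_num & 0xfff) == desired_bucket:
--                 options.append((x, y))
--     return options
-- ===== SOURCE B (Python) =====
-- START = (0x7e5)
--
-- def brute_force_collision(desired_bucket, cur_num=START):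
--     # Per x, solve (base*M + y) mod 4096 == desired_bucket for y directly:
--     # only one residue class mod 4096 works, so at most one y in range(256).
--     if not (0 <= desired_bucket < 4096):
--         return []
--     options = []
--     for x in range(256):
--         t = ((x + START * 0x13377331) * 0x13377331) % 4096
--         y = (desired_bucket - t) % 4096
--         if y < 256:
--             options.append((x, y))
--     return options
-- ===== Notes on version B (the rewrite author's own statement) =====
-- stated objective: faster
-- what changed: A scans all 65536 (x,y) pairs; B first rejects desired_bucket outside [0,4096) and then, for each of the 256 values of x, solves (t + y) mod 4096 == desired_bucket directly for the unique candidate y, eliminating the inner 256-iteration loop.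
import Mathlib
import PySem

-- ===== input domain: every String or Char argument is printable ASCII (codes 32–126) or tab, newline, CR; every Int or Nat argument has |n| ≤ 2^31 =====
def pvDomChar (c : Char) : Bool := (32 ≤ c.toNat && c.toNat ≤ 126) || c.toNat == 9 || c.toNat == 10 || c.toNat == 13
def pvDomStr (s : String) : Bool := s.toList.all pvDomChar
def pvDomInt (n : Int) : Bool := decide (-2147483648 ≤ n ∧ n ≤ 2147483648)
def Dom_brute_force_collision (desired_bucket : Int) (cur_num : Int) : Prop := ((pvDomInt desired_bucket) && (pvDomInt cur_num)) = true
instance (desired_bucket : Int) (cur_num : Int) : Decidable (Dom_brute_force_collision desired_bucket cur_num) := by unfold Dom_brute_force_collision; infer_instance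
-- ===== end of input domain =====

-- B replaces A's inner 256-iteration loop over y by directly solving the modular
-- equation (t + y) mod 4096 == desired_bucket for the unique candidate y (objective: faster, constant factor).

-- ===== PORT A =====
def brute_force_collision (desired_bucket : Int) (_cur_num : Int) : List (Int × Int) :=
  (PySem.List.pyRange 0 256 1).foldl (fun options x =>
    (PySem.List.pyRange 0 256 1).foldl (fun options y =>
      let c0 : Int := 0x7e5                    -- cur_num = START
      let c1 := x + c0 * 0x13377331            -- cur_num = x + cur_num * 0x13377331
      let c2 := y + c1 * 0x13377331            -- cur_num = y + cur_num * 0x13377331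
      if PySem.Int.band c2 0xfff = desired_bucket then options ++ [(x, y)] else options)
      options) []

-- ===== PORT B =====
def brute_force_collision_alt (desired_bucket : Int) (_cur_num : Int) : List (Int × Int) :=
  if 0 ≤ desired_bucket ∧ desired_bucket < 4096 then
    (PySem.List.pyRange 0 256 1).foldl (fun options x =>
      let t := PySem.Int.mod ((x + 0x7e5 * 0x13377331) * 0x13377331) 4096
      let y := PySem.Int.mod (desired_bucket - t) 4096
      if y < 256 then options ++ [(x, y)] else options) []
  else []

-- ===== PRECONDITION & SPEC =====
def Spec_brute_force_collision (desired_bucket : Int) (cur_num : Int) (out : List (Int × Int)) : Prop := out = brute_force_collision_alt desired_bucket cur_num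
instance (desired_bucket : Int) (cur_num : Int) (out : List (Int × Int)) : Decidable (Spec_brute_force_collision desired_bucket cur_num out) := by unfold Spec_brute_force_collision; infer_instance

-- ===== CLAIM (what is proved, stated in full; the proofs are below) =====
def Claim_equal_brute_force_collision : Prop := ∀ (desired_bucket : Int) (cur_num : Int), Dom_brute_force_collision desired_bucket cur_num → Spec_brute_force_collision desired_bucket cur_num (brute_force_collision desired_bucket cur_num)

-- ===== LEMMAS AND PROOFS =====

-- generic: conditional-append foldl is append of filter-then-map
theorem pvFoldlAppendIf {α β : Type} (l : List α) (p : α → Prop) [DecidablePred p]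
    (f : α → β) (acc : List β) :
    l.foldl (fun a y => if p y then a ++ [f y] else a) acc
      = acc ++ (l.filter (fun y => decide (p y))).map f := by
  induction l generalizing acc with
  | nil => simp
  | cons z zs ih =>
    simp only [List.foldl_cons, List.filter_cons]
    by_cases hz : p z <;> simp [hz, ih]

-- generic: foldl congruence on members
theorem pvFoldlCongr {α β : Type} (l : List α) (f g : β → α → β) (init : β)
    (h : ∀ acc x, x ∈ l → f acc x = g acc x) : l.foldl f init = l.foldl g init := by
  induction l generalizing init with
  | nil => rfl
  | cons z zs ih =>
    simp only [List.foldl_cons]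
    rw [h init z (by simp)]
    exact ih _ (fun acc x hx => h acc x (by simp [hx]))

-- filtering an integer range for one value
theorem pvFilterRangeEq (n : Nat) : ∀ (a y0 : Int),
    (PySem.List.pyRange a (a + n) 1).filter (fun y => decide (y = y0))
      = if a ≤ y0 ∧ y0 < a + n then [y0] else [] := by
  induction n with
  | zero =>
    intro a y0
    rw [PySem.List.pyRange_one_eq_nil (by omega), if_neg (by omega)]
    rfl
  | succ n ih =>
    intro a y0
    have hb : ((n + 1 : Nat) : Int) = (n : Int) + 1 := by push_cast; ring
    rw [hb, PySem.List.pyRange_one_cons (by omega),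
        show a + ((n : Int) + 1) = (a + 1) + (n : Int) by ring,
        List.filter_cons]
    by_cases ha : a = y0
    · subst ha
      rw [ih]
      simp only [decide_true, if_neg (show ¬(a + 1 ≤ a ∧ a < a + 1 + (n : Int)) by omega),
        if_pos (show a ≤ a ∧ a < a + 1 + (n : Int) by omega)]
      simp
    · rw [ih]
      simp only [decide_eq_true_eq, if_neg ha]
      by_cases h1 : a + 1 ≤ y0 ∧ y0 < a + 1 + (n : Int)
      · rw [if_pos h1, if_pos (by omega)]
      · rw [if_neg h1, if_neg (by omega)]

-- A's bucket test, for 0 ≤ y < 256, picks exactly B's candidate y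
theorem pvCondIff (v y db : Int) (hv : 0 ≤ v) (hy0 : 0 ≤ y) (hy1 : y < 256) :
    (PySem.Int.band (y + v) 0xfff = db)
      ↔ ((0 ≤ db ∧ db < 4096) ∧ y = (db - v % 4096) % 4096) := by
  rw [PySem.Int.band_of_nonneg (by omega) (by norm_num)]
  have h1 : ((4095 : Int).toNat) = 4095 := rfl
  rw [h1]
  have h2 : (y + v).toNat &&& 4095 = (y + v).toNat % 4096 := by
    have := Nat.and_two_pow_sub_one_eq_mod (y + v).toNat 12
    norm_num at this; omega
  rw [h2]
  constructor
  · intro h; omega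
  · intro h; omega

-- the inner y-loop of A computes B's per-x contribution
theorem pvInner (x db : Int) (hx : 0 ≤ x) (opts : List (Int × Int)) :
    (PySem.List.pyRange 0 256 1).foldl (fun options y =>
        if PySem.Int.band (y + (x + 0x7e5 * 0x13377331) * 0x13377331) 0xfff = db
        then options ++ [(x, y)] else options) opts
      = opts ++ (if 0 ≤ db ∧ db < 4096 then
          (if (db - ((x + 0x7e5 * 0x13377331) * 0x13377331) % 4096) % 4096 < 256
           then [(x, (db - ((x + 0x7e5 * 0x13377331) * 0x13377331) % 4096) % 4096)]
           else [])
        else []) := by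
  set v : Int := (x + 0x7e5 * 0x13377331) * 0x13377331 with hvdef
  have hv : 0 ≤ v := by
    rw [hvdef]
    exact mul_nonneg (by omega) (by norm_num)
  rw [pvFoldlAppendIf (PySem.List.pyRange 0 256 1)
        (fun y => PySem.Int.band (y + v) 0xfff = db) (fun y => (x, y)) opts]
  congr 1
  have hfe : (PySem.List.pyRange 0 256 1).filter
      (fun y => decide (PySem.Int.band (y + v) 0xfff = db))
      = (PySem.List.pyRange 0 256 1).filter
      (fun y => decide ((0 ≤ db ∧ db < 4096) ∧ y = (db - v % 4096) % 4096)) := by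
    apply List.filter_congr
    intro y hy
    rw [PySem.List.mem_pyRange_one] at hy
    simp only [decide_eq_decide]
    exact pvCondIff v y db hv hy.1 hy.2
  rw [hfe]
  by_cases hdb : 0 ≤ db ∧ db < 4096
  · rw [if_pos hdb,
      show (fun y => decide ((0 ≤ db ∧ db < 4096) ∧ y = (db - v % 4096) % 4096))
          = (fun y => decide (y = (db - v % 4096) % 4096)) from
        funext (fun y => by simp [hdb.1, hdb.2])]
    have hfr := pvFilterRangeEq 256 0 ((db - v % 4096) % 4096)
    rw [show ((0 : Int) + ((256 : Nat) : Int)) = 256 by norm_num] at hfr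
    rw [hfr]
    have hge : 0 ≤ (db - v % 4096) % 4096 := by omega
    by_cases hlt : (db - v % 4096) % 4096 < 256
    · rw [if_pos ⟨hge, hlt⟩, if_pos hlt]; rfl
    · rw [if_neg (by omega), if_neg hlt]; rfl
  · rw [if_neg hdb,
      List.filter_eq_nil_iff.mpr
        (fun y _ => by simp only [decide_eq_true_eq]; tauto)]
    rfl

-- ===== VERDICT (by name: the statement is the Claim_ definition above) =====
theorem brute_force_collision_spec : Claim_equal_brute_force_collision := by
  intro db cur _
  unfold Spec_brute_force_collision brute_force_collision brute_force_collision_alt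
  by_cases hdb : 0 ≤ db ∧ db < 4096
  · rw [if_pos hdb]
    apply pvFoldlCongr
    intro acc x hx
    rw [PySem.List.mem_pyRange_one] at hx
    show (PySem.List.pyRange 0 256 1).foldl (fun options y =>
        if PySem.Int.band (y + (x + 0x7e5 * 0x13377331) * 0x13377331) 0xfff = db
        then options ++ [(x, y)] else options) acc = _
    rw [pvInner x db hx.1 acc, if_pos hdb]
    show _ = (if PySem.Int.mod (db - PySem.Int.mod ((x + 0x7e5 * 0x13377331) * 0x13377331) 4096) 4096 < 256
        then acc ++ [(x, PySem.Int.mod (db - PySem.Int.mod ((x + 0x7e5 * 0x13377331) * 0x13377331) 4096) 4096)]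
        else acc)
    simp only [show ∀ a : Int, PySem.Int.mod a 4096 = a % 4096 from fun a => by
      show a.fmod 4096 = a % 4096
      rw [Int.fmod_eq_emod, if_pos (Or.inl (by norm_num))]; ring]
    split_ifs <;> simp
  · rw [if_neg hdb]
    rw [pvFoldlCongr (PySem.List.pyRange 0 256 1) _
        (fun (acc : List (Int × Int)) (_ : Int) => acc) []
        (fun acc x hx => by
          rw [PySem.List.mem_pyRange_one] at hx
          show (PySem.List.pyRange 0 256 1).foldl (fun options y =>
              if PySem.Int.band (y + (x + 0x7e5 * 0x13377331) * 0x13377331) 0xfff = db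
              then options ++ [(x, y)] else options) acc = acc
          rw [pvInner x db hx.1 acc, if_neg hdb, List.append_nil])]
    exact List.foldl_fixed _
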